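-- pv_equiv track=rewrite | github.com/j-rewerts/practice-problems | daily-coding/111/cody.py | getIndices
-- ===== SOURCE A (Python) =====
-- def getIndices(word, sub):
--     indices = []
--     subDict = {}
--     for char in sub:
--         subDict[char] = subDict.get(char, 0) + 1
--
--     length = len(sub)
--     for i in range(len(word) - len(sub) + 1):
--         wordDict = {}
--         for j in range(i, i+length):
--             char = word[j]
--             wordDict[char] = wordDict.get(char, 0) + 1
--
--         if wordDict == subDict:
--             indices.append(i)
--
--     return indices
-- ===== SOURCE B (Python) =====
-- def getIndices(word, sub):
--     n, m = len(word), len(sub)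
--     if m > n:
--         return []
--     need = {}
--     for c in sub:
--         need[c] = need.get(c, 0) + 1
--     window = {}
--     for c in word[:m]:
--         window[c] = window.get(c, 0) + 1
--     indices = [0] if window == need else []
--     for i in range(1, n - m + 1):
--         c = word[i + m - 1]
--         window[c] = window.get(c, 0) + 1
--         out = word[i - 1]
--         v = window[out]
--         if v == 1:
--             del window[out]
--         else:
--             window[out] = v - 1
--         if window == need:
--             indices.append(i)
--     return indices
-- ===== Notes on version B (the rewrite author's own statement) =====
-- stated objective: alternative
-- what changed: Instead of rebuilding the whole character-count dict of word[i:i+m] from scratch for every position i, B keeps one sliding-window counter and updates it incrementally per step (add the entering char, decrement/delete the leaving one), comparing it to sub's counter each step; intended as faster (O(n*m) -> O(n*k) with k distinct chars) but measured only ~1.2x on the generated inputs, so not claimed.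
import Mathlib
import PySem

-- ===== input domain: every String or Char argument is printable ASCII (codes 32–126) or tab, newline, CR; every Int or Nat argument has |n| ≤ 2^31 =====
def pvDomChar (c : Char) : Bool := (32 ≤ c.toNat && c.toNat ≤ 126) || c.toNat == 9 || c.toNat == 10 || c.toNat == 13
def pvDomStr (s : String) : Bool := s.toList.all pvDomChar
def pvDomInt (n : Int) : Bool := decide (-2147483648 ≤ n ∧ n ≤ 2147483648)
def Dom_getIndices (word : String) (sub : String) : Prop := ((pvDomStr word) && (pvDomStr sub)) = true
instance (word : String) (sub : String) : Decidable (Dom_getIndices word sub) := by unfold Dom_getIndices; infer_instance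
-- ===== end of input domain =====

-- B replaces A's per-position recount of the window with one sliding window whose character
-- counter is updated incrementally (one insert, one decrement/delete per step).

-- ===== PORT A =====
-- Python's `dict1 == dict2` (order-insensitive map equality; exact on dicts with distinct
-- keys, which is every dict Python can hold): same size and every key of d maps equally in e.
def pyDictEq (d e : PySem.Dict Char Int) : Bool :=
  d.size == e.size && d.keys.all (fun k => d.get? k == e.get? k)

-- the body of A's outer loop: rebuild wordDict over word[i:i+length] and compare
def aStep (w : List Char) (length : Int) (subDict : PySem.Dict Char Int)
    (indices : List Int) (i : Int) : List Int :=
  let wordDict := (PySem.List.pyRange i (i + length) 1).foldl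
    (fun d j =>
      let c := PySem.List.pyGetD w j ' '   -- word[j]; always in range here
      d.insert c (d.getD c 0 + 1)) PySem.Dict.empty
  if pyDictEq wordDict subDict then indices ++ [i] else indices

def getIndices (word : String) (sub : String) : List Int :=
  let w := word.toList
  let s := sub.toList
  let subDict := s.foldl (fun d c => d.insert c (d.getD c 0 + 1)) PySem.Dict.empty
  let length : Int := (s.length : Int)
  (PySem.List.pyRange 0 ((w.length : Int) - (s.length : Int) + 1) 1).foldl
    (aStep w length subDict) []

-- ===== PORT B =====
-- the body of B's loop: slide the window one step (add word[i+m-1], drop word[i-1]) and compare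
def altStep (w : List Char) (m : Int) (need : PySem.Dict Char Int)
    (st : List Int × PySem.Dict Char Int) (i : Int) : List Int × PySem.Dict Char Int :=
  let c := PySem.List.pyGetD w (i + m - 1) ' '
  let window := st.2.insert c (st.2.getD c 0 + 1)
  let out := PySem.List.pyGetD w (i - 1) ' '
  let v := window.getD out 0          -- window[out]: the key is always present here, so no KeyError
  let window := if v == 1 then window.erase out else window.insert out (v - 1)
  (if pyDictEq window need then st.1 ++ [i] else st.1, window)

def getIndices_alt (word : String) (sub : String) : List Int :=
  let w := word.toList
  let s := sub.toList
  let n : Int := (w.length : Int)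
  let m : Int := (s.length : Int)
  if m > n then []
  else
    let need := s.foldl (fun d c => d.insert c (d.getD c 0 + 1)) PySem.Dict.empty
    let window := (PySem.List.slice w none (some m)).foldl
      (fun d c => d.insert c (d.getD c 0 + 1)) PySem.Dict.empty
    let indices : List Int := if pyDictEq window need then [0] else []
    ((PySem.List.pyRange 1 (n - m + 1) 1).foldl (altStep w m need) (indices, window)).1

-- ===== PRECONDITION & SPEC =====
def Spec_getIndices (word : String) (sub : String) (out : List Int) : Prop := out = getIndices_alt word sub
instance (word : String) (sub : String) (out : List Int) : Decidable (Spec_getIndices word sub out) := by unfold Spec_getIndices; infer_instance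

-- ===== CLAIM (what is proved, stated in full; the proofs are below) =====
def Claim_equal_getIndices : Prop := ∀ (word : String) (sub : String), Dom_getIndices word sub → Spec_getIndices word sub (getIndices word sub)

-- ===== LEMMAS AND PROOFS =====

-- d represents the (finite-support, nonnegative) multiset f: absent key = count 0
def CntRep (d : PySem.Dict Char Int) (f : Char → Int) : Prop :=
  ∀ c, d.get? c = if f c = 0 then none else some (f c)

lemma dict_erase_get? (d : PySem.Dict Char Int) (k c : Char) :
    (d.erase k).get? c = if c = k then none else d.get? c := by
  obtain ⟨l⟩ := d
  induction l with
  | nil => simp [PySem.Dict.erase, PySem.Dict.get?]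
  | cons p rest ih =>
    simp only [PySem.Dict.erase, PySem.Dict.get?] at *
    by_cases hpk : p.1 = k <;> by_cases hpc : p.1 = c <;>
      simp_all [beq_iff_eq]

lemma dict_erase_nodup (d : PySem.Dict Char Int) (k : Char) (h : d.keys.Nodup) :
    (d.erase k).keys.Nodup := by
  obtain ⟨l⟩ := d
  simp only [PySem.Dict.erase, PySem.Dict.keys] at *
  exact h.sublist (List.Sublist.map _ List.filter_sublist)

lemma cntRep_counter (l : List Char) :
    CntRep (PySem.Dict.counter l) (fun c => (l.count c : Int)) := by
  intro c
  by_cases hc : c ∈ l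
  · have hko : (PySem.Dict.counter l).contains c = true := by
      rw [PySem.Dict.contains_counter]; exact List.contains_iff.mpr hc
    have hs : ((PySem.Dict.counter l).get? c).isSome := by
      rw [← PySem.Dict.contains_eq_isSome_get?]; exact hko
    obtain ⟨v, hv⟩ := Option.isSome_iff_exists.mp hs
    have hg : (PySem.Dict.counter l).getD c 0 = v := by
      rw [PySem.Dict.getD_eq_get?_getD, hv]; rfl
    rw [PySem.Dict.getD_counter] at hg
    have hcnt : l.count c ≠ 0 := by simp [List.count_eq_zero, hc]
    simp [hv, ← hg, Int.natCast_eq_zero, hcnt]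
  · have : (PySem.Dict.counter l).get? c = none := by
      rw [PySem.Dict.get?_eq_none_iff_contains, PySem.Dict.contains_counter]
      simp [hc]
    simp [this, List.count_eq_zero_of_not_mem hc]

lemma cntRep_getD {d : PySem.Dict Char Int} {f : Char → Int} (h : CntRep d f)
    (c : Char) (_hf : 0 ≤ f c) : d.getD c 0 = f c := by
  rw [PySem.Dict.getD_eq_get?_getD, h c]
  split_ifs with h0 <;> simp [h0]

lemma cntRep_insert_add {d : PySem.Dict Char Int} {f : Char → Int} (h : CntRep d f)
    (hf : ∀ c, 0 ≤ f c) (a : Char) :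
    CntRep (d.insert a (d.getD a 0 + 1)) (fun c => if c = a then f a + 1 else f c) := by
  intro c
  rw [PySem.Dict.get?_insert, cntRep_getD h a (hf a)]
  by_cases hca : c = a
  · have : f a + 1 ≠ 0 := by have := hf a; omega
    simp [hca, this]
  · simp [hca, h c]

lemma cntRep_erase {d : PySem.Dict Char Int} {f : Char → Int} (h : CntRep d f)
    (b : Char) : CntRep (d.erase b) (fun c => if c = b then 0 else f c) := by
  intro c
  rw [dict_erase_get?]
  by_cases hcb : c = b <;> simp [hcb, h c]

lemma cntRep_insert_sub {d : PySem.Dict Char Int} {f : Char → Int} (h : CntRep d f)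
    (b : Char) (hge : 1 ≤ f b) (hne : f b ≠ 1) :
    CntRep (d.insert b (d.getD b 0 - 1)) (fun c => if c = b then f b - 1 else f c) := by
  intro c
  rw [PySem.Dict.get?_insert, cntRep_getD h b (by omega)]
  by_cases hcb : c = b
  · have : f b - 1 ≠ 0 := by omega
    simp [hcb, this]
  · simp [hcb, h c]

lemma cntRep_mem_keys {d : PySem.Dict Char Int} {f : Char → Int} (h : CntRep d f)
    (c : Char) : c ∈ d.keys ↔ f c ≠ 0 := by
  rw [← PySem.Dict.contains_iff_mem_keys, PySem.Dict.contains_eq_isSome_get?, h c]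
  split_ifs with h0 <;> simp [h0]

lemma keys_length_eq_size (d : PySem.Dict Char Int) : d.keys.length = d.size := by
  simp [PySem.Dict.keys, PySem.Dict.size]

lemma pyDictEq_true_iff {d e : PySem.Dict Char Int} {f g : Char → Int}
    (hd : CntRep d f) (he : CntRep e g) (hnd : d.keys.Nodup) (hne : e.keys.Nodup) :
    pyDictEq d e = true ↔ ∀ c, f c = g c := by
  constructor
  · rintro hEq c
    rw [pyDictEq, Bool.and_eq_true, beq_iff_eq, List.all_eq_true] at hEq
    obtain ⟨hsize, hall⟩ := hEq
    by_cases hcd : c ∈ d.keys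
    · have := hall c hcd
      rw [beq_iff_eq, hd c, he c] at this
      split_ifs at this with h1 h2 h2 <;> simp_all
    · -- c outside d's keys: f c = 0; show c outside e's keys too, so g c = 0
      have hf0 : f c = 0 := by by_contra h0; exact hcd ((cntRep_mem_keys hd c).mpr h0)
      have hsub : d.keys.toFinset ⊆ e.keys.toFinset := by
        intro k hk
        rw [List.mem_toFinset] at hk ⊢
        have hk' : d.get? k = e.get? k := by have := hall k hk; rwa [beq_iff_eq] at this
        have hfk : f k ≠ 0 := (cntRep_mem_keys hd k).mp hk
        have hsome : e.get? k = some (f k) := by rw [← hk', hd k]; simp [hfk]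
        have hc : (e.get? k).isSome := by simp [hsome]
        rw [← PySem.Dict.contains_eq_isSome_get?] at hc
        exact (PySem.Dict.contains_iff_mem_keys e k).mp hc
      have hcard : e.keys.toFinset.card ≤ d.keys.toFinset.card := by
        rw [List.toFinset_card_of_nodup hnd, List.toFinset_card_of_nodup hne,
          keys_length_eq_size, keys_length_eq_size, hsize]
      have hfin : d.keys.toFinset = e.keys.toFinset := Finset.eq_of_subset_of_card_le hsub hcard
      have hce : c ∉ e.keys := fun hc =>
        hcd (List.mem_toFinset.mp (hfin ▸ List.mem_toFinset.mpr hc))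
      have hg0 : g c = 0 := by by_contra h0; exact hce ((cntRep_mem_keys he c).mpr h0)
      rw [hf0, hg0]
  · intro hfg
    have hget : ∀ c, d.get? c = e.get? c := by intro c; rw [hd c, he c, hfg c]
    have hmem : ∀ c, c ∈ d.keys ↔ c ∈ e.keys := by
      intro c; rw [cntRep_mem_keys hd c, cntRep_mem_keys he c, hfg c]
    have hperm : d.keys.Perm e.keys := (List.perm_ext_iff_of_nodup hnd hne).mpr hmem
    rw [pyDictEq, Bool.and_eq_true, beq_iff_eq, List.all_eq_true]
    refine ⟨by rw [← keys_length_eq_size, ← keys_length_eq_size, hperm.length_eq], ?_⟩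
    intro k _
    rw [beq_iff_eq, hget k]

-- the sliding-window slice identity: appending the new char, dropping the old one
lemma window_shift (w : List Char) (m j : Nat) (h : j + m < w.length) :
    (w.drop j).take m ++ [w[j + m]] = w[j] :: (w.drop (j + 1)).take m := by
  have hj : j < w.length := by omega
  have hdl : (w.drop j).length = w.length - j := List.length_drop
  have hml : m < (w.drop j).length := by omega
  have h1 : (w.drop j).take (m + 1) = (w.drop j).take m ++ [w[j + m]] := by
    rw [List.take_add_one]
    congr 1
    rw [List.getElem?_drop]
    simp [List.getElem?_eq_getElem (by omega : j + m < w.length)]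
  have h2 : w.drop j = w[j] :: w.drop (j + 1) := List.drop_eq_getElem_cons hj
  rw [← h1, h2, List.take_succ_cons]

-- A's inner index loop over range(i, i+k) is a fold over the window slice
lemma foldl_pyRange_window (w : List Char) (g : PySem.Dict Char Int → Char → PySem.Dict Char Int)
    (i : Int) (k : Nat) (h0 : 0 ≤ i) (hk : i.toNat + k ≤ w.length) (init : PySem.Dict Char Int) :
    (PySem.List.pyRange i (i + (k : Int)) 1).foldl (fun d j => g d (PySem.List.pyGetD w j ' ')) init
      = ((w.drop i.toNat).take k).foldl g init := by
  induction k generalizing init with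
  | zero =>
    rw [show i + ((0:Nat):Int) = i by push_cast; ring, PySem.List.pyRange_one_eq_nil le_rfl]
    simp
  | succ k ih =>
    have hk' : i.toNat + k ≤ w.length := by omega
    have hrange : PySem.List.pyRange i (i + ((k:Int) + 1)) 1
        = PySem.List.pyRange i (i + (k:Int)) 1 ++ [i + (k:Int)] := by
      have := PySem.List.pyRange_one_succ_right (a := i) (b := i + (k : Int)) (by omega)
      rw [← this]; ring_nf
    have htake : (w.drop i.toNat).take (k + 1)
        = (w.drop i.toNat).take k ++ [w[i.toNat + k]] := by
      rw [List.take_add_one, List.getElem?_drop,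
        List.getElem?_eq_getElem (by omega : i.toNat + k < w.length)]
      simp
      rfl
    have hget : PySem.List.pyGetD w (i + (k : Int)) ' ' = w[i.toNat + k] := by
      rw [PySem.List.pyGetD_eq_getElem w ' ' (by omega) (by push_cast; omega)]
      congr 1; omega
    push_cast
    push_cast at hrange
    rw [hrange, List.foldl_append, ih (by omega) init, htake, List.foldl_append]
    simp [hget]

-- window counts as an Int-valued function
lemma cnt_nonneg (l : List Char) (c : Char) : (0 : Int) ≤ (l.count c : Int) := Int.natCast_nonneg _

-- facts used only by the congruence steps below
lemma cntRep_congr {d : PySem.Dict Char Int} {f g : Char → Int} (h : CntRep d f)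
    (hfg : ∀ c, f c = g c) : CntRep d g := fun c => by rw [← hfg c, h c]

-- A's loop body, rewritten through the counter of the window slice
lemma aStep_counter (w s : List Char) (i : Int) (acc : List Int) (h0 : 0 ≤ i)
    (hk : i.toNat + s.length ≤ w.length) :
    aStep w (s.length : Int) (PySem.Dict.counter s) acc i
      = if pyDictEq (PySem.Dict.counter ((w.drop i.toNat).take s.length)) (PySem.Dict.counter s)
        then acc ++ [i] else acc := by
  simp only [aStep]
  rw [foldl_pyRange_window w (fun d c => d.insert c (d.getD c 0 + 1)) i s.length h0 hk,
      PySem.Dict.foldl_insert_getD_add_one_eq_counter]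

-- B's loop body: one sliding step preserves the window-counter invariant and
-- appends the index exactly when the window is an anagram of sub
lemma altStep_step (w s : List Char) (j : Nat) (acc : List Int) (d : PySem.Dict Char Int)
    (hjm : j + s.length < w.length)
    (hrep : CntRep d (fun c => (((w.drop j).take s.length).count c : Int)))
    (hnd : d.keys.Nodup) :
    ∃ d', altStep w (s.length : Int) (PySem.Dict.counter s) (acc, d) ((j : Int) + 1)
        = (if pyDictEq (PySem.Dict.counter ((w.drop (j + 1)).take s.length)) (PySem.Dict.counter s)
           then acc ++ [(j : Int) + 1] else acc, d')
      ∧ CntRep d' (fun c => (((w.drop (j + 1)).take s.length).count c : Int)) ∧ d'.keys.Nodup := by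
  have hj : j < w.length := by omega
  have hjm' : j + s.length < w.length := hjm
  have hidx1 : (j : Int) + 1 + (s.length : Int) - 1 = ((j + s.length : Nat) : Int) := by push_cast; ring
  have hidx2 : (j : Int) + 1 - 1 = ((j : Nat) : Int) := by push_cast; ring
  have hg1 : w.getD (j + s.length) ' ' = w[j + s.length] := List.getD_eq_getElem w ' ' hjm
  have hg2 : w.getD j ' ' = w[j] := List.getD_eq_getElem w ' ' hj
  simp only [altStep, hidx1, hidx2, PySem.List.pyGetD_natCast, hg1, hg2]
  -- the enlarged window w[j : j+m+1]
  have hshift := window_shift w s.length j hjm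
  have h1 : CntRep (d.insert (w[j + s.length]) (d.getD (w[j + s.length]) 0 + 1))
      (fun c => (((w[j] :: (w.drop (j + 1)).take s.length).count c : Nat) : Int)) := by
    refine cntRep_congr (cntRep_insert_add hrep (fun c => cnt_nonneg _ _) (w[j + s.length])) ?_
    intro c
    rw [← hshift, List.count_append]
    by_cases hc : c = w[j + s.length]
    · simp [hc]
    · simp [hc, Ne.symm hc]
  have hnd1 : (d.insert (w[j + s.length]) (d.getD (w[j + s.length]) 0 + 1)).keys.Nodup :=
    PySem.Dict.nodup_keys_insert _ _ _ hnd
  set window1 := d.insert (w[j + s.length]) (d.getD (w[j + s.length]) 0 + 1) with hw1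
  have hv : window1.getD (w[j]) 0
      = (((w[j] :: (w.drop (j + 1)).take s.length).count (w[j]) : Nat) : Int) :=
    cntRep_getD h1 _ (cnt_nonneg _ _)
  rw [List.count_cons_self] at hv
  by_cases h0 : ((w.drop (j + 1)).take s.length).count (w[j]) = 0
  · -- the outgoing char reaches count 0: Python deletes the key
    have hveq : (window1.getD (w[j]) 0 == 1) = true := by rw [hv, h0]; simp
    rw [hveq]
    simp only [if_true]
    have h2 : CntRep (window1.erase (w[j]))
        (fun c => (((w.drop (j + 1)).take s.length).count c : Int)) := by
      refine cntRep_congr (cntRep_erase h1 (w[j])) ?_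
      intro c
      by_cases hc : c = w[j]
      · simp [hc, h0]
      · simp [hc, Ne.symm hc]
    have hnd2 : (window1.erase (w[j])).keys.Nodup := dict_erase_nodup _ _ hnd1
    refine ⟨window1.erase (w[j]), ?_, h2, hnd2⟩
    have hcond : pyDictEq (window1.erase (w[j])) (PySem.Dict.counter s)
        = pyDictEq (PySem.Dict.counter ((w.drop (j + 1)).take s.length)) (PySem.Dict.counter s) := by
      rw [Bool.eq_iff_iff,
        pyDictEq_true_iff h2 (cntRep_counter s) hnd2 (PySem.Dict.nodup_keys_counter s),
        pyDictEq_true_iff (cntRep_counter _) (cntRep_counter s)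
          (PySem.Dict.nodup_keys_counter _) (PySem.Dict.nodup_keys_counter s)]
    rw [hcond]
  · -- the outgoing char stays: Python decrements
    have hveq : (window1.getD (w[j]) 0 == 1) = false := by
      rw [hv]; simp; omega
    rw [hveq]
    simp only [Bool.false_eq_true, if_false]
    have h2 : CntRep (window1.insert (w[j]) (window1.getD (w[j]) 0 - 1))
        (fun c => (((w.drop (j + 1)).take s.length).count c : Int)) := by
      refine cntRep_congr (cntRep_insert_sub h1 (w[j])
        (by simp only [List.count_cons_self]; push_cast; omega)
        (by simp only [List.count_cons_self]; push_cast; omega)) ?_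
      intro c
      by_cases hc : c = w[j]
      · simp only [hc, List.count_cons_self]; push_cast; ring
      · simp [hc, Ne.symm hc]
    have hnd2 : (window1.insert (w[j]) (window1.getD (w[j]) 0 - 1)).keys.Nodup :=
      PySem.Dict.nodup_keys_insert _ _ _ hnd1
    refine ⟨_, ?_, h2, hnd2⟩
    have hcond : pyDictEq (window1.insert (w[j]) (window1.getD (w[j]) 0 - 1)) (PySem.Dict.counter s)
        = pyDictEq (PySem.Dict.counter ((w.drop (j + 1)).take s.length)) (PySem.Dict.counter s) := by
      rw [Bool.eq_iff_iff,
        pyDictEq_true_iff h2 (cntRep_counter s) hnd2 (PySem.Dict.nodup_keys_counter s),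
        pyDictEq_true_iff (cntRep_counter _) (cntRep_counter s)
          (PySem.Dict.nodup_keys_counter _) (PySem.Dict.nodup_keys_counter s)]
    rw [hcond]

-- the main loop: B's incremental fold produces the same index list as A's recounting fold
lemma loop_eq (w s : List Char) (_hm : s.length ≤ w.length) :
    ∀ (K : Nat) (i : Int), 1 ≤ i → ((w.length : Int) - (s.length : Int) + 1) - i = (K : Int) →
    ∀ (acc : List Int) (d : PySem.Dict Char Int),
      CntRep d (fun c => (((w.drop (i - 1).toNat).take s.length).count c : Int)) →
      d.keys.Nodup →
      ((PySem.List.pyRange i ((w.length : Int) - (s.length : Int) + 1) 1).foldl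
          (altStep w (s.length : Int) (PySem.Dict.counter s)) (acc, d)).1
        = (PySem.List.pyRange i ((w.length : Int) - (s.length : Int) + 1) 1).foldl
          (aStep w (s.length : Int) (PySem.Dict.counter s)) acc := by
  intro K
  induction K with
  | zero =>
    intro i h1 hK acc d hrep hnd
    rw [PySem.List.pyRange_one_eq_nil (by omega)]
    simp
  | succ k ih =>
    intro i h1 hK acc d hrep hnd
    have hib : i < (w.length : Int) - (s.length : Int) + 1 := by omega
    rw [PySem.List.pyRange_one_cons hib]
    simp only [List.foldl_cons]
    have hieq : i = ((i - 1).toNat : Int) + 1 := by omega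
    set j := (i - 1).toNat with hjdef
    have hjm : j + s.length < w.length := by omega
    have hrep' : CntRep d (fun c => (((w.drop j).take s.length).count c : Int)) := hrep
    obtain ⟨d', hstep, hrep2, hnd2⟩ := altStep_step w s j acc d hjm hrep' hnd
    rw [hieq, hstep]
    have hAstep : aStep w (s.length : Int) (PySem.Dict.counter s) acc ((j : Int) + 1)
        = if pyDictEq (PySem.Dict.counter ((w.drop (j + 1)).take s.length)) (PySem.Dict.counter s)
          then acc ++ [(j : Int) + 1] else acc := by
      have := aStep_counter w s ((j : Int) + 1) acc (by omega) (by
        have : ((j : Int) + 1).toNat = j + 1 := by omega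
        omega)
      rwa [show ((j : Int) + 1).toNat = j + 1 from by omega] at this
    rw [hAstep]
    set acc' := if pyDictEq (PySem.Dict.counter ((w.drop (j + 1)).take s.length))
        (PySem.Dict.counter s) then acc ++ [(j : Int) + 1] else acc with hacc'
    have hnext : ((j : Int) + 1) + 1 - 1 = ((j + 1 : Nat) : Int) := by push_cast; ring
    have ih' := ih ((j : Int) + 1 + 1) (by omega) (by omega) acc' d'
      (by rw [show (((j : Int) + 1 + 1 - 1).toNat) = j + 1 from by omega]; exact hrep2) hnd2
    exact ih'

-- ===== VERDICT (by name: the statement is the Claim_ definition above) =====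
theorem getIndices_spec : Claim_equal_getIndices := by
  intro word sub _
  unfold Spec_getIndices
  simp only [getIndices, getIndices_alt]
  set w := word.toList with hw
  set s := sub.toList with hs
  by_cases hmn : (s.length : Int) > (w.length : Int)
  · rw [if_pos hmn, PySem.List.pyRange_one_eq_nil (by omega)]
    simp
  · rw [if_neg hmn]
    rw [PySem.Dict.foldl_insert_getD_add_one_eq_counter s,
        PySem.List.slice_to_natCast w s.length,
        PySem.Dict.foldl_insert_getD_add_one_eq_counter (w.take s.length)]
    rw [PySem.List.pyRange_one_cons (by omega : (0 : Int) < (w.length : Int) - (s.length : Int) + 1)]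
    simp only [List.foldl_cons]
    have hA0 : aStep w (s.length : Int) (PySem.Dict.counter s) [] 0
        = if pyDictEq (PySem.Dict.counter (w.take s.length)) (PySem.Dict.counter s)
          then [(0 : Int)] else [] := by
      have := aStep_counter w s 0 [] le_rfl (by simpa using (by omega : s.length ≤ w.length))
      simpa using this
    rw [hA0, show (0 : Int) + 1 = (1 : Int) by norm_num]
    exact (loop_eq w s (by omega) (w.length - s.length) 1 le_rfl (by push_cast; omega) _
      (PySem.Dict.counter (w.take s.length))
      (by
        have h := cntRep_counter (w.take s.length)
        refine cntRep_congr h ?_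
        intro c
        rw [show ((1 : Int) - 1).toNat = 0 from rfl, List.drop_zero])
      (PySem.Dict.nodup_keys_counter _)).symm
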